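-- pv_equiv track=rewrite | github.com/devyuseon/problem-solving | programmers/2022_kakao_blind/신고_결과_받기.py | solution
-- ===== SOURCE A (Python) =====
-- def solution(id_list, report, k):
--     from collections import defaultdict
--
--     count = defaultdict(set)
--     result = defaultdict(int)
--     answer = []
--
--     for r in report:
--         user, target = r.split()
--         count[target].add(user)
--
--     for key, val in count.items():
--         if len(val) >= k: # key 유저는 정지됨
--             for user in val:
--                 result[user] += 1
--
--     for id in id_list:
--         if id in result.keys():
--             answer.append(result[id])
--         else:
--             answer.append(0)
--
--     return answer
-- ===== SOURCE B (Python) =====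
-- def solution(id_list, report, k):
--     # sort the deduplicated (user, target) pairs by target, then sweep the
--     # contiguous runs: a run of length >= k is a banned target, credit its users
--     pairs = sorted({tuple(r.split()) for r in report}, key=lambda p: p[1])
--     hits = []
--     while pairs:
--         t = pairs[0][1]
--         j = 0
--         while j < len(pairs) and pairs[j][1] == t:
--             j += 1
--         if j >= k:
--             hits += [u for u, _ in pairs[:j]]
--         pairs = pairs[j:]
--     return [hits.count(i) for i in id_list]
-- ===== Notes on version B (the rewrite author's own statement) =====
-- stated objective: alternative
-- what changed: Replaces A's target-keyed dict-of-reporter-sets with nested ban-then-tally loops by a sort-then-sweep: sort the deduplicated (user,target) pairs by target, peel contiguous runs with a two-level while loop, credit the users of every run of length >= k into a flat hits list, and read each answer off with hits.count(id).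
import Mathlib
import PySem

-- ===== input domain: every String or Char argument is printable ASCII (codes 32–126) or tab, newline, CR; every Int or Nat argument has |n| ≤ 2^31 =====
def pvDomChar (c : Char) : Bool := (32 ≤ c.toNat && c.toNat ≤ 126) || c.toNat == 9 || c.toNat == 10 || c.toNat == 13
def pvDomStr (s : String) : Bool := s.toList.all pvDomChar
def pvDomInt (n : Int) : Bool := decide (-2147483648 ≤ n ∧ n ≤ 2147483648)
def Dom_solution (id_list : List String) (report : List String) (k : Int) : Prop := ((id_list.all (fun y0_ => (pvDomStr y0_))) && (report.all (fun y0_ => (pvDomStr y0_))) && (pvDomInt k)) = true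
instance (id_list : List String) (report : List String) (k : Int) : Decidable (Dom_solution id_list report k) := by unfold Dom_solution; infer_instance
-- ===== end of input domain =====

-- B replaces A's target-keyed dict-of-reporter-sets and nested ban/tally loops by a
-- sort-then-sweep: sort the deduplicated pairs by target, credit the users of every
-- contiguous run of length ≥ k, and read each answer off with list.count (alternative
-- decomposition; return-value equivalence only).

-- ===== PORT A =====
def solution (id_list : List String) (report : List String) (k : Int) : List Int :=
  -- count = defaultdict(set); for r in report: user, target = r.split(); count[target].add(user)
  let count : PySem.Dict String (PySem.Set String) :=
    report.foldl (fun d r =>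
      match PySem.Str.split₀ r with
      | [user, target] => d.insert target (PySem.Set.add (d.getD target []) user)
      | _ => d) PySem.Dict.empty   -- '_' branch unreachable under Pre_ (unpacking raises otherwise)
  -- result = defaultdict(int); for key, val in count.items(): if len(val) >= k: for user in val: result[user] += 1
  let result : PySem.Dict String Int :=
    count.items.foldl (fun res kv =>
      if k ≤ PySem.Set.len kv.2 then
        List.foldl (fun res user => res.insert user (res.getD user 0 + 1)) res kv.2
      else res) PySem.Dict.empty
  -- for id in id_list: answer.append(result[id] if id in result.keys() else 0)
  id_list.map (fun id => if result.contains id then result.getD id 0 else 0)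

-- ===== PORT B =====
-- tuple(r.split()) restricted to the two tokens present under Pre_ (Source B raises otherwise, like A)
def pvParse (r : String) : String × String :=
  let toks := PySem.Str.split₀ r
  (toks.getD 0 "", toks.getD 1 "")

-- inner while: j scans forward while pairs[j][1] == t
def pvRunLen (t : String) : List (String × String) → Nat
  | [] => 0
  | p :: rest => if p.2 == t then pvRunLen t rest + 1 else 0

-- outer while: peel the leading run; a run of length >= k credits its users into hits
def pvSweep (k : Int) (pairs : List (String × String)) (hits : List String) : List String :=
  match pairs with
  | [] => hits
  | p :: rest =>
      let j := pvRunLen p.2 (p :: rest)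
      pvSweep k ((p :: rest).drop j)
        (if k ≤ (j : Int) then hits ++ ((p :: rest).take j).map (fun q => q.1) else hits)
termination_by pairs.length
decreasing_by
  simp only [List.length_drop, List.length_cons, pvRunLen, BEq.rfl, if_pos]
  omega

def solution_alt (id_list : List String) (report : List String) (k : Int) : List Int :=
  -- pairs = sorted({tuple(r.split()) for r in report}, key=lambda p: p[1])
  let pairs := PySem.List.sorted (PySem.Set.ofList (report.map pvParse)) (fun p => p.2)
  -- while pairs: … (sweep over the runs)
  let hits := pvSweep k pairs []
  -- return [hits.count(i) for i in id_list]
  id_list.map (fun i => (PySem.List.count hits i : Int))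

-- ===== PRECONDITION & SPEC =====
-- Pre_ excludes exactly the inputs where some report entry does not split into two
-- whitespace-separated tokens: there 'user, target = r.split()' raises ValueError in A (and B).
def Pre_solution (id_list : List String) (report : List String) (k : Int) : Prop :=
  ∀ r ∈ report, (PySem.Str.split₀ r).length = 2
instance (id_list : List String) (report : List String) (k : Int) : Decidable (Pre_solution id_list report k) := by unfold Pre_solution; infer_instance

def pvWitness_solution : List String × List String × Int :=
  (["muzi", "frodo", "apeach"], ["muzi frodo", "apeach frodo", "muzi frodo"], 2)

def Spec_solution (id_list : List String) (report : List String) (k : Int) (out : List Int) : Prop := out = solution_alt id_list report k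
instance (id_list : List String) (report : List String) (k : Int) (out : List Int) : Decidable (Spec_solution id_list report k out) := by unfold Spec_solution; infer_instance

-- ===== CLAIM (what is proved, stated in full; the proofs are below) =====
def Claim_equal_solution : Prop := ∀ (id_list : List String) (report : List String) (k : Int), Dom_solution id_list report k → Pre_solution id_list report k → Spec_solution id_list report k (solution id_list report k)

-- ===== LEMMAS AND PROOFS =====

-- under Pre_, r.split() is exactly the two components of pvParse r
theorem pv_split_eq (r : String) (h : (PySem.Str.split₀ r).length = 2) :
    PySem.Str.split₀ r = [(pvParse r).1, (pvParse r).2] := by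
  rcases hs : PySem.Str.split₀ r with _ | ⟨a, _ | ⟨b, _ | ⟨c, l⟩⟩⟩ <;>
    simp [hs] at h <;> simp [pvParse, hs]

-- A's grouping fold, rewritten over the parsed pair list
theorem pv_countA_eq (report : List String) (h : ∀ r ∈ report, (PySem.Str.split₀ r).length = 2) :
    report.foldl (fun d r =>
      match PySem.Str.split₀ r with
      | [user, target] => d.insert target (PySem.Set.add (d.getD target []) user)
      | _ => d) PySem.Dict.empty
    = (report.map pvParse).foldl
        (fun d p => d.insert p.2 (PySem.Set.add (d.getD p.2 []) p.1)) PySem.Dict.empty := by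
  rw [List.foldl_map]
  refine PySem.List.foldl_congr_mem report _ _ _ (fun acc r hr => ?_)
  rw [pv_split_eq r (h r hr)]

theorem pv_contains_getD (d : PySem.Dict String Int) (u : String) :
    (if d.contains u then d.getD u 0 else 0) = d.getD u 0 := by
  cases h : d.contains u with
  | true => simp
  | false => simp [PySem.Dict.getD_of_not_contains d 0 h]

theorem pv_getD_group (l : List (String × String)) (d : PySem.Dict String (PySem.Set String)) (t : String) :
    (l.foldl (fun d p => d.insert p.2 (PySem.Set.add (d.getD p.2 []) p.1)) d).getD t []
    = List.foldl PySem.Set.add (d.getD t [])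
        ((l.filter (fun p => p.2 == t)).map (fun p => p.1)) := by
  induction l generalizing d with
  | nil => simp
  | cons p l ih =>
    simp only [List.foldl_cons, ih, List.filter_cons]
    by_cases h : p.2 = t
    · simp [h]
    · have h' : ¬ t = p.2 := fun ht => h ht.symm
      simp [h, h', PySem.Dict.getD_insert]

theorem pv_keys_group (l : List (String × String)) :
    (l.foldl (fun d p => d.insert p.2 (PySem.Set.add (d.getD p.2 []) p.1)) PySem.Dict.empty).keys
    = PySem.Set.ofList (l.map (fun p => p.2)) := by
  have := PySem.Dict.keys_foldl_insert_key l (fun p => p.2)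
      (fun d p => PySem.Set.add (d.getD p.2 []) p.1) PySem.Dict.empty
  simpa [PySem.Dict.keys_empty, PySem.Set.update_nil_left] using this

theorem pv_nodup_keys_group (l : List (String × String)) :
    (l.foldl (fun d p => d.insert p.2 (PySem.Set.add (d.getD p.2 []) p.1)) PySem.Dict.empty).keys.Nodup := by
  exact PySem.Dict.nodup_keys_foldl_insert_key l (fun p => p.2)
      (fun d p => PySem.Set.add (d.getD p.2 []) p.1) PySem.Dict.empty (by simp [PySem.Dict.keys_empty])

theorem pv_getD_tally (k : Int) (items : List (String × PySem.Set String))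
    (d : PySem.Dict String Int) (u : String) :
    (items.foldl (fun res kv =>
      if k ≤ PySem.Set.len kv.2 then
        List.foldl (fun res user => res.insert user (res.getD user 0 + 1)) res kv.2
      else res) d).getD u 0
    = d.getD u 0 + (items.map (fun kv =>
        if k ≤ PySem.Set.len kv.2 then (List.count u kv.2 : Int) else 0)).sum := by
  induction items generalizing d with
  | nil => simp
  | cons kv items ih =>
    simp only [List.foldl_cons, List.map_cons, List.sum_cons]
    by_cases h : k ≤ PySem.Set.len kv.2
    · rw [if_pos h, if_pos h, ih, PySem.Dict.getD_foldl_insert_add_one]; ring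
    · rw [if_neg h, if_neg h, ih]; ring

theorem pv_pair_eq {x y : String × String} (h1 : x.1 = y.1) (h2 : x.2 = y.2) : x = y := by
  rcases x with ⟨a, b⟩; rcases y with ⟨c, d⟩; simp_all

theorem pv_mem_V (parsed : List (String × String)) (t u : String) :
    u ∈ PySem.Set.ofList ((parsed.filter (fun p => p.2 == t)).map (fun p => p.1))
    ↔ (u, t) ∈ PySem.Set.ofList parsed := by
  rw [PySem.Set.mem_ofList, PySem.Set.mem_ofList]
  simp only [List.mem_map, List.mem_filter, beq_iff_eq]
  constructor
  · rintro ⟨p, ⟨hp, h2⟩, rfl⟩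
    rwa [pv_pair_eq (x := p) (y := (p.1, t)) rfl h2] at hp
  · intro h
    exact ⟨(u, t), ⟨h, rfl⟩, rfl⟩

theorem pv_len_V (parsed : List (String × String)) (t : String) :
    ((PySem.Set.ofList ((parsed.filter (fun p => p.2 == t)).map (fun p => p.1))).length : Int)
    = (List.count t ((PySem.Set.ofList parsed).map (fun p => p.2)) : Int) := by
  have hP : (PySem.Set.ofList parsed).Nodup := PySem.Set.nodup_ofList parsed
  rw [List.count_eq_countP, List.countP_map]
  have hfil : List.countP ((fun x => x == t) ∘ fun p => p.2) (PySem.Set.ofList parsed)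
      = ((PySem.Set.ofList parsed).filter (fun p => p.2 == t)).length := by
    rw [List.countP_eq_length_filter]; rfl
  rw [hfil]
  set L := (PySem.Set.ofList parsed).filter (fun p => p.2 == t) with hL
  have hLsnd : ∀ p ∈ L, p.2 = t := by
    intro p hp; exact beq_iff_eq.mp (List.mem_filter.mp hp).2
  have hLnodup : (L.map (fun p => p.1)).Nodup := by
    refine List.Nodup.map_on ?_ (hP.filter _)
    intro x hx y hy hxy
    exact pv_pair_eq hxy (by rw [hLsnd x hx, hLsnd y hy])
  have hVnodup : (PySem.Set.ofList ((parsed.filter (fun p => p.2 == t)).map (fun p => p.1))).Nodup :=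
    PySem.Set.nodup_ofList _
  have hperm : (PySem.Set.ofList ((parsed.filter (fun p => p.2 == t)).map (fun p => p.1))).Perm
      (L.map (fun p => p.1)) := by
    rw [List.perm_ext_iff_of_nodup hVnodup hLnodup]
    intro u
    rw [pv_mem_V]
    constructor
    · intro h
      exact List.mem_map.mpr ⟨(u, t), List.mem_filter.mpr ⟨h, by simp⟩, rfl⟩
    · intro h
      obtain ⟨p, hp, hpe⟩ := List.mem_map.mp h
      rw [← hpe, ← pv_pair_eq (x := p) (y := (p.1, t)) rfl (hLsnd p hp)]
      exact (List.mem_filter.mp hp).1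
  rw [hperm.length_eq, List.length_map]

theorem pv_countT_eq_countP (P : List (String × String)) (T : List String)
    (c : String → Bool) (id : String)
    (hP : P.Nodup) (hT : T.Nodup) (hmem : ∀ t, t ∈ T ↔ t ∈ P.map (fun p => p.2)) :
    (T.countP (fun t => c t && decide ((id, t) ∈ P)))
    = P.countP (fun p => c p.2 && (p.1 == id)) := by
  rw [List.countP_eq_length_filter, List.countP_eq_length_filter]
  set Lp := P.filter (fun p => c p.2 && (p.1 == id)) with hLp
  have hfst : ∀ p ∈ Lp, p.1 = id := by
    intro p hp
    exact beq_iff_eq.mp (Bool.and_elim_right (List.mem_filter.mp hp).2)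
  have hnodup : (Lp.map (fun p => p.2)).Nodup := by
    refine List.Nodup.map_on ?_ (hP.filter _)
    intro x hx y hy hxy
    exact pv_pair_eq (by rw [hfst x hx, hfst y hy]) hxy
  have hperm : (T.filter (fun t => c t && decide ((id, t) ∈ P))).Perm (Lp.map (fun p => p.2)) := by
    rw [List.perm_ext_iff_of_nodup (hT.filter _) hnodup]
    intro t
    rw [List.mem_filter]
    constructor
    · rintro ⟨-, hct⟩
      have hc' := Bool.and_elim_left hct
      have hmemP := of_decide_eq_true (Bool.and_elim_right hct)
      exact List.mem_map.mpr ⟨(id, t), List.mem_filter.mpr ⟨hmemP, by simp [hc']⟩, rfl⟩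
    · intro h
      obtain ⟨p, hp, hpe⟩ := List.mem_map.mp h
      have h1 := hfst p hp
      have hmemP : p ∈ P := (List.mem_filter.mp hp).1
      have hcp := Bool.and_elim_left (List.mem_filter.mp hp).2
      have hpid : p = (id, p.2) := pv_pair_eq h1 rfl
      subst hpe
      refine ⟨(hmem p.2).mpr (List.mem_map.mpr ⟨p, hmemP, rfl⟩), ?_⟩
      simp only [hcp, Bool.true_and]
      exact decide_eq_true (hpid ▸ hmemP)
  rw [hperm.length_eq, List.length_map]

-- ===== B-side lemmas: the run peeled by pvRunLen, and the sweep count =====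

theorem pv_runlen_le (t : String) (S : List (String × String)) : pvRunLen t S ≤ S.length := by
  induction S with
  | nil => simp [pvRunLen]
  | cons p rest ih => by_cases h : p.2 == t <;> simp [pvRunLen, h] <;> omega

theorem pv_run_take (t : String) (S : List (String × String)) :
    ∀ q ∈ S.take (pvRunLen t S), q.2 = t := by
  induction S with
  | nil => simp
  | cons p rest ih =>
    by_cases h : p.2 = t
    · simp only [pvRunLen, h, BEq.rfl, if_pos, List.take_succ_cons]
      intro q hq
      rcases List.mem_cons.mp hq with rfl | hq'
      · exact h
      · exact ih q hq'
    · simp [pvRunLen, h]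

theorem pv_run_drop (t : String) (S : List (String × String))
    (hpair : S.Pairwise (fun a b => a.2 ≤ b.2)) (hmin : ∀ q ∈ S, t ≤ q.2) :
    ∀ q ∈ S.drop (pvRunLen t S), q.2 ≠ t := by
  induction S with
  | nil => simp
  | cons p rest ih =>
    by_cases h : p.2 = t
    · simp only [pvRunLen, h, BEq.rfl, if_pos, List.drop_succ_cons]
      exact ih (hpair.sublist (List.sublist_cons_self p rest))
        (fun q hq => hmin q (List.mem_cons_of_mem p hq))
    · have hlt : t < p.2 :=
        lt_of_le_of_ne (hmin p List.mem_cons_self) (fun e => h e.symm)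
      have h0 : pvRunLen t (p :: rest) = 0 := by simp [pvRunLen, h]
      rw [h0, List.drop_zero]
      intro q hq
      rcases List.mem_cons.mp hq with rfl | hq'
      · exact h
      · have hle : p.2 ≤ q.2 := (List.pairwise_cons.mp hpair).1 q hq'
        exact fun e => (not_le.mpr hlt) (e ▸ hle)

theorem pv_run_count (t : String) (S : List (String × String))
    (hpair : S.Pairwise (fun a b => a.2 ≤ b.2)) (hmin : ∀ q ∈ S, t ≤ q.2) :
    (S.map (fun q => q.2)).count t = pvRunLen t S := by
  conv_lhs => rw [← List.take_append_drop (pvRunLen t S) S]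
  rw [List.map_append, List.count_append]
  have h1 : (List.map (fun q => q.2) (S.take (pvRunLen t S))).count t
      = (S.take (pvRunLen t S)).length := by
    rw [List.count_eq_length.mpr ?_, List.length_map]
    intro b hb
    obtain ⟨q, hq, rfl⟩ := List.mem_map.mp hb
    exact (pv_run_take t S q hq).symm
  have h2 : (List.map (fun q => q.2) (S.drop (pvRunLen t S))).count t = 0 := by
    rw [List.count_eq_zero]
    intro hmem
    obtain ⟨q, hq, he⟩ := List.mem_map.mp hmem
    exact pv_run_drop t S hpair hmin q hq he
  rw [h1, h2, List.length_take, Nat.add_zero, Nat.min_eq_left (pv_runlen_le t S)]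

theorem pv_countP_split {α : Type} (l : List α) (j : Nat) (pr : α → Bool) :
    l.countP pr = (l.take j).countP pr + (l.drop j).countP pr := by
  rw [← List.countP_append, List.take_append_drop]

theorem pv_count_snd_drop (t : String) (S : List (String × String)) (j : Nat)
    (htake : ∀ q ∈ S.take j, q.2 = t) (x : String) (hx : x ≠ t) :
    (S.map (fun q => q.2)).count x = ((S.drop j).map (fun q => q.2)).count x := by
  conv_lhs => rw [← List.take_append_drop j S]
  rw [List.map_append, List.count_append]
  have h0 : (List.map (fun q => q.2) (S.take j)).count x = 0 := by
    rw [List.count_eq_zero]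
    intro hmem
    obtain ⟨q, hq, he⟩ := List.mem_map.mp hmem
    exact hx (he ▸ htake q hq)
  rw [h0, Nat.zero_add]

-- the sweep counts: value of hits.count(id) after the sweep over a snd-sorted list
theorem pv_sweep_count (k : Int) (id : String) (S : List (String × String)) (hits : List String) :
    S.Pairwise (fun a b => a.2 ≤ b.2) →
    (pvSweep k S hits).count id
    = hits.count id
      + S.countP (fun q => decide (k ≤ ((S.map (fun r => r.2)).count q.2 : Int)) && (q.1 == id)) := by
  induction S, hits using pvSweep.induct (k := k) with
  | case1 hits => intro _; simp [pvSweep]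
  | case2 hits p rest j0 ih =>
    intro hpair
    set S := p :: rest with hS
    set j := pvRunLen p.2 S with hj
    have hmin : ∀ q ∈ S, p.2 ≤ q.2 := by
      intro q hq
      rcases List.mem_cons.mp hq with rfl | hq'
      · exact le_refl _
      · exact (List.pairwise_cons.mp hpair).1 q hq'
    have hcnt : (S.map (fun q => q.2)).count p.2 = j := pv_run_count p.2 S hpair hmin
    have htake : ∀ q ∈ S.take j, q.2 = p.2 := pv_run_take p.2 S
    have hdrop : ∀ q ∈ S.drop j, q.2 ≠ p.2 := pv_run_drop p.2 S hpair hmin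
    have hpairD : (S.drop j).Pairwise (fun a b => a.2 ≤ b.2) :=
      hpair.sublist (List.drop_sublist j S)
    have ihD : List.count id (pvSweep k (List.drop j S)
          (if k ≤ (j : Int) then hits ++ (List.take j S).map (fun q => q.1) else hits))
        = List.count id (if k ≤ (j : Int) then hits ++ (List.take j S).map (fun q => q.1) else hits)
          + (List.drop j S).countP
              (fun q => decide (k ≤ (((List.drop j S).map (fun r => r.2)).count q.2 : Int)) && (q.1 == id)) :=
      ih hpairD
    rw [pvSweep]
    simp only [← hS, ← hj]
    -- drop-part predicates coincide (counts taken in S or in its run-free tail agree)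
    have hdropP : (S.drop j).countP
          (fun q => decide (k ≤ (((S.drop j).map (fun r => r.2)).count q.2 : Int)) && (q.1 == id))
        = (S.drop j).countP
          (fun q => decide (k ≤ ((S.map (fun r => r.2)).count q.2 : Int)) && (q.1 == id)) := by
      refine List.countP_congr (fun q hq => ?_)
      rw [pv_count_snd_drop p.2 S j htake q.2 (hdrop q hq)]
    -- take part: every element has snd = p.2, whose count is j
    have htakeP : (S.take j).countP
          (fun q => decide (k ≤ ((S.map (fun r => r.2)).count q.2 : Int)) && (q.1 == id))
        = if k ≤ (j : Int) then (S.take j).countP (fun q => q.1 == id) else 0 := by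
      by_cases hk : k ≤ (j : Int)
      · rw [if_pos hk]
        refine List.countP_congr (fun q hq => ?_)
        rw [htake q hq, hcnt]
        simp [hk]
      · rw [if_neg hk, List.countP_eq_zero]
        intro q hq
        rw [htake q hq, hcnt]
        simp [hk]
    have hcntmap : ((S.take j).map (fun q => q.1)).count id
        = (S.take j).countP (fun q => q.1 == id) := by
      rw [List.count_eq_countP, List.countP_map]; rfl
    rw [pv_countP_split S j, htakeP]
    by_cases hk : k ≤ (j : Int)
    · rw [if_pos hk] at ihD ⊢
      rw [ihD, hdropP, List.count_append, hcntmap, if_pos hk]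
      omega
    · rw [if_neg hk] at ihD ⊢
      rw [ihD, hdropP, if_neg hk]
      omega

-- ===== main assembly =====
theorem solution_spec : Claim_equal_solution := by
  intro id_list report k _hdom hpre
  show solution id_list report k = solution_alt id_list report k
  simp only [solution, solution_alt]
  -- common abbreviations
  set parsed := report.map pvParse with hparsed
  set P : List (String × String) := PySem.Set.ofList parsed with hPdef
  set T : List String := PySem.Set.ofList (parsed.map (fun p => p.2)) with hTdef
  have hPnodup : P.Nodup := PySem.Set.nodup_ofList parsed
  have hTnodup : T.Nodup := PySem.Set.nodup_ofList _
  have hTmem : ∀ t, t ∈ T ↔ t ∈ P.map (fun p => p.2) := by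
    intro t
    rw [hTdef, PySem.Set.mem_ofList]
    constructor
    · intro h
      obtain ⟨p, hp, rfl⟩ := List.mem_map.mp h
      exact List.mem_map.mpr ⟨p, (PySem.Set.mem_ofList parsed p).mpr hp, rfl⟩
    · intro h
      obtain ⟨p, hp, rfl⟩ := List.mem_map.mp h
      exact List.mem_map.mpr ⟨p, (PySem.Set.mem_ofList parsed p).mp hp, rfl⟩
  -- A's grouping dict
  rw [pv_countA_eq report hpre]
  set countA := parsed.foldl (fun d p => d.insert p.2 (PySem.Set.add (d.getD p.2 []) p.1))
      PySem.Dict.empty with hcountA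
  have hgetD : ∀ t, countA.getD t []
      = PySem.Set.ofList ((parsed.filter (fun p => p.2 == t)).map (fun p => p.1)) := by
    intro t
    rw [hcountA, pv_getD_group, PySem.Dict.getD_empty, ← PySem.Set.ofList_eq_foldl]
  have hitems : countA.items = T.map (fun t =>
      (t, PySem.Set.ofList ((parsed.filter (fun p => p.2 == t)).map (fun p => p.1)))) := by
    rw [PySem.Dict.items_eq_map_keys countA (pv_nodup_keys_group parsed) []]
    rw [show countA.keys = T from pv_keys_group parsed]
    exact List.map_congr_left (fun t _ => by rw [hgetD t])
  -- the sorted pair list B sweeps over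
  set S := PySem.List.sorted P (fun p => p.2) with hSdef
  have hpairS : S.Pairwise (fun a b => a.2 ≤ b.2) := PySem.List.sorted_pairwise P (fun p => p.2)
  have hpermS : S.Perm P := PySem.List.sorted_perm P (fun p => p.2) false
  -- both outputs are maps over id_list: compare pointwise
  refine List.map_congr_left (fun id hid => ?_)
  -- A's value at id
  rw [pv_contains_getD, pv_getD_tally, PySem.Dict.getD_empty, zero_add, hitems, List.map_map]
  have hA : ∀ t ∈ T,
      ((fun kv => if k ≤ PySem.Set.len kv.2 then (List.count id kv.2 : Int) else 0) ∘
        (fun t => (t, PySem.Set.ofList ((parsed.filter (fun p => p.2 == t)).map (fun p => p.1))))) t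
      = if (decide (k ≤ (List.count t (P.map (fun p => p.2)) : Int))
            && decide ((id, t) ∈ P)) = true then 1 else 0 := by
    intro t _
    have hlen : PySem.Set.len
        (PySem.Set.ofList ((parsed.filter (fun p => p.2 == t)).map (fun p => p.1)))
        = (List.count t (P.map (fun p => p.2)) : Int) := by
      rw [PySem.Set.len_eq, pv_len_V]
    have hcnt : (List.count id
        (PySem.Set.ofList ((parsed.filter (fun p => p.2 == t)).map (fun p => p.1))) : Int)
        = if (id, t) ∈ P then 1 else 0 := by
      by_cases hm : (id, t) ∈ P
      · rw [List.count_eq_one_of_mem (PySem.Set.nodup_ofList _) ((pv_mem_V parsed t id).mpr hm)]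
        simp [hm]
      · rw [List.count_eq_zero.mpr (fun hmm => hm ((pv_mem_V parsed t id).mp hmm))]
        simp [hm]
    simp only [Function.comp_apply, hlen, hcnt]
    by_cases hk : k ≤ (List.count t (P.map (fun p => p.2)) : Int) <;>
      by_cases hm : (id, t) ∈ P <;> simp [hk, hm]
  rw [List.map_congr_left hA, PySem.List.sum_map_ite_one_zero,
      pv_countT_eq_countP P T (fun t => decide (k ≤ (List.count t (P.map (fun p => p.2)) : Int)))
        id hPnodup hTnodup hTmem]
  -- B's value at id
  rw [show PySem.List.count (pvSweep k S []) id = List.count id (pvSweep k S []) from rfl,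
      pv_sweep_count k id S [] hpairS, List.count_nil, Nat.zero_add]
  -- identify the two counts through the permutation S ~ P
  have hcongr : S.countP (fun q => decide (k ≤ ((S.map (fun r => r.2)).count q.2 : Int)) && (q.1 == id))
      = S.countP (fun q => decide (k ≤ ((P.map (fun r => r.2)).count q.2 : Int)) && (q.1 == id)) := by
    refine List.countP_congr (fun q _ => ?_)
    rw [(hpermS.map (fun r => r.2)).count_eq]
  rw [hcongr, hpermS.countP_eq]
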